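-- pv_equiv track=rewrite | github.com/Raheelkhan-05/TedTalks | model/app.py | is_tag_query
-- ===== SOURCE A (Python) =====
-- def is_tag_query(query, tag_list):
--     query = query.lower()
--     for tag in tag_list:
--         if tag.lower() == query:
--             return True, tag
--
--     # Try fuzzy matching for tags
--     for tag in tag_list:
--         if query in tag.lower() or tag.lower() in query:
--             return True, tag
--
--     return False, None
-- ===== SOURCE B (Python) =====
-- def is_tag_query(query, tag_list):
--     # Single pass: exact match returns immediately; remember the first fuzzy candidate.
--     q = query.lower()
--     fuzzy = None
--     for tag in tag_list:
--         t = tag.lower()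
--         if t == q:
--             return True, tag
--         if fuzzy is None and (q in t or t in q):
--             fuzzy = tag
--     if fuzzy is not None:
--         return True, fuzzy
--     return False, None
-- ===== Notes on version B (the rewrite author's own statement) =====
-- stated objective: alternative
-- what changed: Replaced A's two sequential full scans (exact pass, then fuzzy pass) by a single pass that returns on an exact match and remembers the first fuzzy candidate for after the loop.
import Mathlib
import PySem

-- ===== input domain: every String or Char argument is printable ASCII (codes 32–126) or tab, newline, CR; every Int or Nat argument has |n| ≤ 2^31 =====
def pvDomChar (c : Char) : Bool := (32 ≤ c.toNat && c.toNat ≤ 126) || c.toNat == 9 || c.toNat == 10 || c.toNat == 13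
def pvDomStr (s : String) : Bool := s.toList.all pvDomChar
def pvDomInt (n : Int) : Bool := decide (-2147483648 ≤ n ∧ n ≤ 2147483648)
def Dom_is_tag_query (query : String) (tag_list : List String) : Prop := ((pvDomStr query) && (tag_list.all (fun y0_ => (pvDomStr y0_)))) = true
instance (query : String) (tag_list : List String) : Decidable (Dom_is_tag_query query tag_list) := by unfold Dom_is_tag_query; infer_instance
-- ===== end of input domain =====

-- One-pass re-implementation: B returns on an exact match and remembers the first
-- fuzzy candidate instead of A's two sequential scans; same return value everywhere.


-- ===== PORT A =====
-- first loop of A: return the first tag with tag.lower() == q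
def pvAExact (q : String) : List String → Option String
  | [] => none
  | t :: ts => if PySem.Str.lower t == q then some t else pvAExact q ts

-- second loop of A: return the first tag with q in tag.lower() or tag.lower() in q
def pvAFuzzy (q : String) : List String → Option String
  | [] => none
  | t :: ts =>
    if PySem.Str.isIn q (PySem.Str.lower t) || PySem.Str.isIn (PySem.Str.lower t) q then
      some t
    else pvAFuzzy q ts

def is_tag_query (query : String) (tag_list : List String) : Bool × Option String :=
  let q := PySem.Str.lower query
  match pvAExact q tag_list with
  | some t => (true, some t)
  | none =>
    match pvAFuzzy q tag_list with
    | some t => (true, some t)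
    | none => (false, none)

-- ===== PORT B =====
-- B's single loop: exact match returns immediately, first fuzzy candidate is remembered
def pvBLoop (q : String) (fuzzy : Option String) : List String → Bool × Option String
  | [] => match fuzzy with
          | some t => (true, some t)
          | none => (false, none)
  | t :: ts =>
    let tl := PySem.Str.lower t
    if tl == q then (true, some t)
    else
      pvBLoop q
        (if fuzzy.isNone && (PySem.Str.isIn q tl || PySem.Str.isIn tl q) then some t else fuzzy)
        ts

def is_tag_query_alt (query : String) (tag_list : List String) : Bool × Option String :=
  pvBLoop (PySem.Str.lower query) none tag_list

-- ===== PRECONDITION & SPEC =====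
def Spec_is_tag_query (query : String) (tag_list : List String) (out : Bool × Option String) : Prop := out = is_tag_query_alt query tag_list
instance (query : String) (tag_list : List String) (out : Bool × Option String) : Decidable (Spec_is_tag_query query tag_list out) := by unfold Spec_is_tag_query; infer_instance

-- ===== CLAIM (what is proved, stated in full; the proofs are below) =====
def Claim_equal_is_tag_query : Prop := ∀ (query : String) (tag_list : List String), Dom_is_tag_query query tag_list → Spec_is_tag_query query tag_list (is_tag_query query tag_list)

-- ===== LEMMAS AND PROOFS =====

-- B's loop on any remaining list equals: exact winner if any, else the stored
-- candidate if any, else A's fuzzy scan of the remaining list.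
theorem pvBLoop_eq (q : String) (fuzzy : Option String) (ts : List String) :
    pvBLoop q fuzzy ts =
      match pvAExact q ts with
      | some t => (true, some t)
      | none =>
        match fuzzy.or (pvAFuzzy q ts) with
        | some t => (true, some t)
        | none => (false, none) := by
  induction ts generalizing fuzzy with
  | nil => cases fuzzy <;> simp [pvBLoop, pvAExact, pvAFuzzy]
  | cons t ts ih =>
    by_cases hx : PySem.Str.lower t == q
    · simp [pvBLoop, pvAExact, hx]
    · rw [show pvBLoop q fuzzy (t :: ts) =
          pvBLoop q
            (if fuzzy.isNone && (PySem.Str.isIn q (PySem.Str.lower t) || PySem.Str.isIn (PySem.Str.lower t) q)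
             then some t else fuzzy) ts by simp [pvBLoop, hx]]
      rw [ih]
      cases fuzzy with
      | some f => simp [pvAExact, pvAFuzzy, hx]
      | none =>
        by_cases h1 : PySem.Chars.isIn q.toList (PySem.Chars.lower t.toList) = true <;>
        by_cases h2 : PySem.Chars.isIn (PySem.Chars.lower t.toList) q.toList = true <;>
        simp [pvAExact, pvAFuzzy, hx, h1, h2]

-- ===== VERDICT (by name: the statement is the Claim_ definition above) =====
theorem is_tag_query_spec : Claim_equal_is_tag_query := by
  intro query tag_list _
  unfold Spec_is_tag_query is_tag_query is_tag_query_alt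
  rw [pvBLoop_eq]
  simp
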